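-- pv_equiv track=rewrite | github.com/Vegemash/advent_of_code | 2025/04_Printing_Department/python/main.py | part_1
-- ===== SOURCE A (Python) =====
-- def part_1(pinput: str) -> int:
--     sum = 0
--     grid: list[list[bool]] = []
--     for in_row in pinput.splitlines():
--         row: list[bool] = []
--
--         for cell in in_row:
--             row.append(cell == "@")
--         grid.append(row)
--
--     for y, row in enumerate(grid):
--         for x, cell in enumerate(row):
--             if not cell:
--                 continue
--             adjacent_rolls = 0
--             for ya in range(max(0, y - 1), min(y + 2, len(grid))):
--                 for xa in range(max(0, x - 1), min(x + 2, len(row))):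
--                     if ya == y and xa == x:
--                         continue
--                     if grid[ya][xa]:
--                         adjacent_rolls += 1
--             if adjacent_rolls < 4:
--                 sum += 1
--
--     return sum
-- ===== SOURCE B (Python) =====
-- def part_1(pinput: str) -> int:
--     # Two-pass separable windows: per-row horizontal 3-sums once, then one vertical
--     # 3-row sum per '@' cell; the sum includes the centre, so '< 5' is 'adjacent < 4'.
--     grid = [[c == "@" for c in line] for line in pinput.splitlines()]
--     h = [[(x > 0 and row[x - 1]) + row[x] + (x + 1 < len(row) and row[x + 1])
--           for x in range(len(row))] for row in grid]
--
--     def hat(y, x):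
--         if 0 <= y < len(h) and x < len(h[y]):
--             return h[y][x]
--         return 0
--
--     total = 0
--     for y, row in enumerate(grid):
--         for x, cell in enumerate(row):
--             if cell and hat(y - 1, x) + h[y][x] + hat(y + 1, x) < 5:
--                 total += 1
--     return total
-- ===== Notes on version B (the rewrite author's own statement) =====
-- stated objective: alternative
-- what changed: Replaces A's per-occupied-cell 3x3 gather (two nested clamped range loops per cell) by a separable two-pass scheme: one pass precomputes horizontal 3-window sums for every row, then each occupied cell adds just three vertical h-values and compares with 5; it trades per-cell window scanning for a dense precomputation over all cells.
import Mathlib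
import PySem

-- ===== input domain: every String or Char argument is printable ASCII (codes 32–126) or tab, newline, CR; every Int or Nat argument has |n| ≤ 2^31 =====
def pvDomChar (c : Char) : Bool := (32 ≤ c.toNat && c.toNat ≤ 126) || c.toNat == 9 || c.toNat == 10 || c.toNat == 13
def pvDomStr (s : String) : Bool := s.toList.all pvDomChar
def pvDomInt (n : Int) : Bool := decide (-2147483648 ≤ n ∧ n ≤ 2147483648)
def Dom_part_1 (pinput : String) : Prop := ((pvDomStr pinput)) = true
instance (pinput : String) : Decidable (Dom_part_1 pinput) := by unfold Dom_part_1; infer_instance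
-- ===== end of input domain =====

-- B replaces A's per-cell 3x3 gather by a separable two-pass window sum (one horizontal
-- 3-window pass per row, then three vertical lookups per '@' cell). Equal on Pre_ (where A returns).

-- ===== PORT A =====
-- pyGetD is exact here because Pre_part_1 excludes exactly the inputs on which the
-- Python grid[ya][xa] raises IndexError (ragged rows reached from an '@' cell).
def part_1 (pinput : String) : Int :=
  let grid : List (List Bool) :=
    (PySem.Str.splitlines pinput).foldl
      (fun g in_row =>
        g ++ [in_row.toList.foldl (fun row cell => row ++ [cell == '@']) []]) []
  (PySem.List.enumerate grid).foldl
    (fun sum yrow =>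
      (PySem.List.enumerate yrow.2).foldl
        (fun sum xcell =>
          if !xcell.2 then sum
          else
            let adjacent_rolls : Int :=
              (PySem.List.pyRange (max 0 (yrow.1 - 1)) (min (yrow.1 + 2) (PySem.List.len grid))).foldl
                (fun a ya =>
                  (PySem.List.pyRange (max 0 (xcell.1 - 1)) (min (xcell.1 + 2) (PySem.List.len yrow.2))).foldl
                    (fun a xa =>
                      if ya == yrow.1 && xa == xcell.1 then a
                      else if PySem.List.pyGetD (PySem.List.pyGetD grid ya []) xa false then a + 1
                      else a)
                    a)
                0
            if adjacent_rolls < 4 then sum + 1 else sum)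
        sum)
    0

-- ===== PORT B =====
-- hat(y, x) of Source B: h[y][x] when in bounds, else 0.
def pvHat (h : List (List Int)) (y x : Int) : Int :=
  if 0 ≤ y ∧ y < PySem.List.len h ∧ x < PySem.List.len (PySem.List.pyGetD h y []) then
    PySem.List.pyGetD (PySem.List.pyGetD h y []) x 0
  else 0

def part_1_alt (pinput : String) : Int :=
  let grid : List (List Bool) :=
    (PySem.Str.splitlines pinput).map (fun line => line.toList.map (fun c => c == '@'))
  let h : List (List Int) :=
    grid.map (fun row =>
      (PySem.List.pyRange 0 (PySem.List.len row)).map (fun x =>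
        (if 0 < x ∧ PySem.List.pyGetD row (x - 1) false = true then (1 : Int) else 0)
        + (if PySem.List.pyGetD row x false = true then 1 else 0)
        + (if x + 1 < PySem.List.len row ∧ PySem.List.pyGetD row (x + 1) false = true then 1 else 0)))
  (PySem.List.enumerate grid).foldl
    (fun total yrow =>
      (PySem.List.enumerate yrow.2).foldl
        (fun total xcell =>
          if xcell.2 = true ∧
              pvHat h (yrow.1 - 1) xcell.1
                + PySem.List.pyGetD (PySem.List.pyGetD h yrow.1 []) xcell.1 0
                + pvHat h (yrow.1 + 1) xcell.1 < 5 then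
            total + 1
          else total)
        total)
    0

-- ===== PRECONDITION & SPEC =====
-- Pre_part_1 holds exactly where the Python A returns: it fails only when some '@' cell's
-- 3x3 window (clamped by its OWN row's length) reaches past the end of an adjacent shorter
-- row, where A raises IndexError.
def Pre_part_1 (pinput : String) : Prop :=
  ∀ (y : Nat) (hy : y < ((PySem.Str.splitlines pinput).map String.toList).length)
    (x : Nat) (hx : x < (((PySem.Str.splitlines pinput).map String.toList)[y]).length),
    (((PySem.Str.splitlines pinput).map String.toList)[y])[x] = '@' →
    ∀ (ya : Nat) (hya : ya < ((PySem.Str.splitlines pinput).map String.toList).length),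
      y ≤ ya + 1 → ya ≤ y + 1 →
      min (x + 2) ((((PySem.Str.splitlines pinput).map String.toList)[y]).length)
        ≤ (((PySem.Str.splitlines pinput).map String.toList)[ya]).length

instance (pinput : String) : Decidable (Pre_part_1 pinput) := by
  unfold Pre_part_1; infer_instance

def pvWitness_part_1 : String := "@@.\n.@@\n@.@"

def Spec_part_1 (pinput : String) (out : Int) : Prop := out = part_1_alt pinput
instance (pinput : String) (out : Int) : Decidable (Spec_part_1 pinput out) := by unfold Spec_part_1; infer_instance

-- ===== CLAIM (what is proved, stated in full; the proofs are below) =====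
def Claim_equal_part_1 : Prop := ∀ (pinput : String), Dom_part_1 pinput → Pre_part_1 pinput → Spec_part_1 pinput (part_1 pinput)

-- ===== LEMMAS AND PROOFS =====

-- A's parsing loop builds exactly the mapped grid B starts from.
lemma pv_grid_eq (pinput : String) :
    (PySem.Str.splitlines pinput).foldl
      (fun g in_row => g ++ [in_row.toList.foldl (fun row cell => row ++ [cell == '@']) []]) []
    = (PySem.Str.splitlines pinput).map (fun line => line.toList.map (fun c => c == '@')) := by
  simp only [PySem.List.foldl_append_singleton_eq_map, List.nil_append]

-- cell indicator of a row, by Python-style defaulted lookup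
def pvCnt (row : List Bool) (xa : Int) : Int :=
  if PySem.List.pyGetD row xa false then 1 else 0

-- horizontal 3-window value of B, as a named function (definitionally B's comprehension body)
def pvEF (row : List Bool) (x : Int) : Int :=
  (if 0 < x ∧ PySem.List.pyGetD row (x - 1) false = true then (1 : Int) else 0)
  + (if PySem.List.pyGetD row x false = true then 1 else 0)
  + (if x + 1 < PySem.List.len row ∧ PySem.List.pyGetD row (x + 1) false = true then 1 else 0)

def pvRowF (row : List Bool) : List Int :=
  (PySem.List.pyRange 0 (PySem.List.len row)).map (pvEF row)

-- the precondition, restated on the boolean grid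
def PreG (G : List (List Bool)) : Prop :=
  ∀ (y : Nat) (hy : y < G.length) (x : Nat) (hx : x < G[y].length),
    G[y][x] = true →
    ∀ (ya : Nat) (hya : ya < G.length), y ≤ ya + 1 → ya ≤ y + 1 →
      min (x + 2) (G[y].length) ≤ G[ya].length

lemma pv_pre_to_preG (pinput : String) (h : Pre_part_1 pinput) :
    PreG ((PySem.Str.splitlines pinput).map (fun line => line.toList.map (fun c => c == '@'))) := by
  intro y hy x hx hc ya hya h1 h2
  have hy' : y < ((PySem.Str.splitlines pinput).map String.toList).length := by
    simpa only [List.length_map] using hy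
  have hya' : ya < ((PySem.Str.splitlines pinput).map String.toList).length := by
    simpa only [List.length_map] using hya
  have hx' : x < (((PySem.Str.splitlines pinput).map String.toList)[y]).length := by
    simpa only [List.getElem_map, List.length_map] using hx
  have hc' : (((PySem.Str.splitlines pinput).map String.toList)[y])[x] = '@' := by
    simpa only [List.getElem_map, beq_iff_eq] using hc
  have := h y hy' x hx' hc' ya hya' h1 h2
  simpa only [List.getElem_map, List.length_map] using this

-- small explicit ranges
lemma pv_pyRange_two (a : Int) : PySem.List.pyRange a (a+2) = [a, a+1] := by
  rw [PySem.List.pyRange_one_cons (by omega), PySem.List.pyRange_one_cons (by omega),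
      PySem.List.pyRange_one_eq_nil (by omega)]
lemma pv_pyRange_three (a : Int) : PySem.List.pyRange a (a+3) = [a, a+1, a+1+1] := by
  rw [PySem.List.pyRange_one_cons (by omega), PySem.List.pyRange_one_cons (by omega),
      PySem.List.pyRange_one_cons (by omega), PySem.List.pyRange_one_eq_nil (by omega)]

-- A's inner loop as a sum
lemma pv_foldl_skip (row : List Bool) (y x ya lo hi a : Int) :
    (PySem.List.pyRange lo hi).foldl
      (fun a xa => if ya == y && xa == x then a
        else if PySem.List.pyGetD row xa false then a + 1 else a) a
    = a + ((PySem.List.pyRange lo hi).map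
        (fun xa => if ya = y ∧ xa = x then 0 else pvCnt row xa)).sum := by
  rw [PySem.List.foldl_congr_mem _ _
      (fun a xa => a + (if ya = y ∧ xa = x then 0 else pvCnt row xa)) a ?_]
  · exact PySem.List.foldl_add _ _ _
  · intro acc xa _
    by_cases h : ya = y ∧ xa = x
    · simp [h]
    · have hb : (ya == y && xa == x) = false := by
        rcases not_and_or.mp h with h1 | h1 <;> simp [h1]
      simp only [hb, Bool.false_eq_true, if_false]
      rw [if_neg h]
      unfold pvCnt; split_ifs <;> omega

-- skipping the centre of a window subtracts its indicator
lemma pv_skip_center (row : List Bool) (x lo hi : Int) (hlo : lo ≤ x) (hhi : x < hi) :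
    ((PySem.List.pyRange lo hi).map (fun xa => if xa = x then (0:Int) else pvCnt row xa)).sum
    = ((PySem.List.pyRange lo hi).map (pvCnt row)).sum - pvCnt row x := by
  rw [PySem.List.pyRange_one_append lo x hi hlo (le_of_lt hhi),
      PySem.List.pyRange_one_cons hhi]
  simp only [List.map_append, List.map_cons, List.sum_append, List.sum_cons]
  have h1 : ∀ xa ∈ PySem.List.pyRange lo x, (if xa = x then (0:Int) else pvCnt row xa) = pvCnt row xa := by
    intro xa hxa
    have := PySem.List.mem_pyRange_one.mp hxa
    rw [if_neg (by omega)]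
  have h2 : ∀ xa ∈ PySem.List.pyRange (x+1) hi, (if xa = x then (0:Int) else pvCnt row xa) = pvCnt row xa := by
    intro xa hxa
    have := PySem.List.mem_pyRange_one.mp hxa
    rw [if_neg (by omega)]
  rw [List.map_congr_left h1, List.map_congr_left h2]
  push_cast
  ring

-- the horizontal window sum equals B's 3-term value (Pre_ gives the bounds facts)
lemma pv_rowWin (row : List Bool) (x w : Nat) (hx : x < w)
    (hw : min (x + 2) w ≤ row.length)
    (hextra : ∀ (h1 : x + 1 < row.length), w ≤ x + 1 → row[x+1] = false) :
    ((PySem.List.pyRange (max 0 ((x:Int) - 1)) (min ((x:Int) + 2) (w:Int))).map (pvCnt row)).sum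
      = pvEF row (x:Int) := by
  have hlen1 : x < row.length := by omega
  have hterm3 : (if (x:Int) + 1 < PySem.List.len row ∧ PySem.List.pyGetD row ((x:Int) + 1) false = true then (1:Int) else 0)
      = (if x + 1 < min (x + 2) w then pvCnt row ((x:Int)+1) else 0) := by
    by_cases h1 : x + 1 < row.length
    · by_cases h2 : x + 2 ≤ w
      · have hl : (x:Int) + 1 < PySem.List.len row := by simp [PySem.List.len]; omega
        rw [if_congr (and_iff_right hl) rfl rfl,
            if_pos (show x + 1 < min (x+2) w by omega)]
        simp [pvCnt]
      · have hgd : PySem.List.pyGetD row ((x:Int)+1) false = false := by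
          rw [show (x:Int) + 1 = ((x+1 : Nat) : Int) by omega, PySem.List.pyGetD_natCast,
              List.getD_eq_getElem?_getD, List.getElem?_eq_getElem h1, hextra h1 (by omega)]
          rfl
        rw [if_neg (by rintro ⟨-, h3⟩; rw [hgd] at h3; cases h3),
            if_neg (show ¬ (x + 1 < min (x+2) w) by omega)]
    · have hnl : row.length ≤ x + 1 := by omega
      have hw1 : w ≤ x + 1 := by omega
      rw [if_neg (by rintro ⟨h2, -⟩; rw [PySem.List.len_eq] at h2; omega),
          if_neg (show ¬ (x + 1 < min (x+2) w) by omega)]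
  rw [pvEF, hterm3]
  by_cases hx0 : x = 0
  · subst hx0
    rw [if_neg (by rintro ⟨h, -⟩; omega)]
    rw [show max 0 (((0:Nat):Int) - 1) = ((0:Nat):Int) by omega]
    by_cases h2 : 2 ≤ w
    · rw [show min (((0:Nat):Int) + 2) (w:Int) = ((0:Nat):Int) + 2 by omega, pv_pyRange_two]
      simp only [List.map_cons, List.map_nil, List.sum_cons, List.sum_nil]
      rw [if_pos (show 0 + 1 < min (0+2) w by omega)]
      simp only [pvCnt]
      ring
    · rw [show min (((0:Nat):Int) + 2) (w:Int) = ((0:Nat):Int) + 1 by omega,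
          PySem.List.pyRange_one_singleton]
      simp only [List.map_cons, List.map_nil, List.sum_cons, List.sum_nil]
      rw [if_neg (show ¬ (0 + 1 < min (0+2) w) by omega)]
      simp only [pvCnt]
      ring
  · have ha : max 0 ((x:Int) - 1) = ((x-1 : Nat) : Int) := by omega
    rw [ha]
    by_cases h2 : x + 2 ≤ w
    · rw [show min ((x:Int) + 2) (w:Int) = ((x-1:Nat):Int) + 3 by omega, pv_pyRange_three]
      simp only [List.map_cons, List.map_nil, List.sum_cons, List.sum_nil]
      rw [if_pos (show x + 1 < min (x+2) w by omega)]
      rw [show (x:Int) - 1 = ((x-1:Nat):Int) by omega]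
      rw [if_congr (and_iff_right (show (0:Int) < (x:Int) by omega)) rfl rfl]
      rw [show (x:Int) = ((x-1:Nat):Int) + 1 by omega]
      simp only [pvCnt]
      ring
    · rw [show min ((x:Int) + 2) (w:Int) = ((x-1:Nat):Int) + 2 by omega, pv_pyRange_two]
      simp only [List.map_cons, List.map_nil, List.sum_cons, List.sum_nil]
      rw [if_neg (show ¬ (x + 1 < min (x+2) w) by omega)]
      rw [show (x:Int) - 1 = ((x-1:Nat):Int) by omega]
      rw [if_congr (and_iff_right (show (0:Int) < (x:Int) by omega)) rfl rfl]
      rw [show (x:Int) = ((x-1:Nat):Int) + 1 by omega]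
      simp only [pvCnt]
      ring

lemma pv_getD_row {α : Type} (xs : List α) (m : Nat) (hm : m < xs.length) (d : α) :
    PySem.List.pyGetD xs (m:Int) d = xs[m] := by
  simp [List.getD_eq_getElem?_getD, List.getElem?_eq_getElem hm]

lemma pv_h_get (G : List (List Bool)) (ya j : Nat) (hya : ya < G.length) (hj : j < G[ya].length) :
    PySem.List.pyGetD (PySem.List.pyGetD (G.map pvRowF) (ya:Int) []) (j:Int) 0 = pvEF G[ya] (j:Int) := by
  have h : PySem.List.pyGetD (G.map pvRowF) (ya:Int) [] = pvRowF G[ya] := by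
    simp [List.getD_eq_getElem?_getD, List.getElem?_map, List.getElem?_eq_getElem hya]
  rw [h, pvRowF]
  have := PySem.List.pyGetD_map_pyRange (pvEF G[ya]) (G[ya].length) j 0 hj
  simpa using this

lemma pv_hat_eq (G : List (List Bool)) (m j : Nat) (hm : m < G.length) (hj : j < G[m].length) :
    pvHat (G.map pvRowF) (m:Int) (j:Int) = pvEF G[m] (j:Int) := by
  have hrow : PySem.List.pyGetD (G.map pvRowF) (m:Int) [] = pvRowF G[m] := by
    simp [List.getD_eq_getElem?_getD, List.getElem?_map, List.getElem?_eq_getElem hm]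
  unfold pvHat
  rw [if_pos, pv_h_get G m j hm hj]
  refine ⟨by omega, ?_, ?_⟩
  · rw [PySem.List.len_eq]
    simp; omega
  · rw [hrow, pvRowF]
    simp [PySem.List.length_pyRange_one]
    omega

lemma pv_hat_lo (h : List (List Int)) (y x : Int) (hy : y < 0) : pvHat h y x = 0 := by
  unfold pvHat; rw [if_neg]; rintro ⟨h1, -⟩; omega

lemma pv_hat_hi (h : List (List Int)) (y x : Int) (hy : PySem.List.len h ≤ y) : pvHat h y x = 0 := by
  unfold pvHat; rw [if_neg]; rintro ⟨-, h1, -⟩; omega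

lemma pv_cell (G : List (List Bool)) (hG : PreG G) (k j : Nat)
    (hk : k < G.length) (hj : j < G[k].length) (hcell : G[k][j] = true) :
    (PySem.List.pyRange (max 0 ((k:Int) - 1)) (min ((k:Int) + 2) (PySem.List.len G))).foldl
      (fun a ya =>
        (PySem.List.pyRange (max 0 ((j:Int) - 1)) (min ((j:Int) + 2) (PySem.List.len G[k]))).foldl
          (fun a xa =>
            if ya == (k:Int) && xa == (j:Int) then a
            else if PySem.List.pyGetD (PySem.List.pyGetD G ya []) xa false then a + 1
            else a)
          a)
      0 + 1
    = pvHat (G.map pvRowF) ((k:Int) - 1) (j:Int)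
      + PySem.List.pyGetD (PySem.List.pyGetD (G.map pvRowF) (k:Int) []) (j:Int) 0
      + pvHat (G.map pvRowF) ((k:Int) + 1) (j:Int) := by
  have hmin := hG k hk j hj hcell
  -- per-row window sum of A equals B's horizontal 3-window value, for rows of the window
  have hrowE : ∀ (m : Nat) (hm : m < G.length), k ≤ m + 1 → m ≤ k + 1 →
      ((PySem.List.pyRange (max 0 ((j:Int) - 1)) (min ((j:Int) + 2) ((G[k].length : Nat):Int))).map
        (pvCnt G[m])).sum = pvEF G[m] (j:Int) := by
    intro m hm h1 h2
    refine pv_rowWin G[m] j (G[k].length) hj (hmin m hm h1 h2) ?_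
    intro h3 h4
    by_contra hne
    have hval : G[m][j+1] = true := by
      cases hval : G[m][j+1] with
      | false => exact absurd hval hne
      | true => rfl
    have := hG m hm (j+1) h3 hval k hk (by omega) (by omega)
    omega
  -- A's double loop as a sum over the vertical window
  rw [PySem.List.foldl_congr_mem _ _
      (fun a ya => a + ((PySem.List.pyRange (max 0 ((j:Int) - 1)) (min ((j:Int) + 2) (PySem.List.len G[k]))).map
        (fun xa => if ya = (k:Int) ∧ xa = (j:Int) then 0 else pvCnt (PySem.List.pyGetD G ya []) xa)).sum) 0
      (by intro acc ya _; exact pv_foldl_skip (PySem.List.pyGetD G ya []) (k:Int) (j:Int) ya _ _ acc),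
      PySem.List.foldl_add]
  simp only [PySem.List.len_eq, zero_add]
  -- the centre row's sum: skip the cell itself
  have hcenter :
      ((PySem.List.pyRange (max 0 ((j:Int) - 1)) (min ((j:Int) + 2) ((G[k].length:Nat):Int))).map
        (fun xa => if (k:Int) = (k:Int) ∧ xa = (j:Int) then 0 else pvCnt (PySem.List.pyGetD G (k:Int) []) xa)).sum
      = pvEF G[k] (j:Int) - 1 := by
    rw [pv_getD_row G k hk []]
    have hcong : ∀ xa, (fun xa => if (k:Int) = (k:Int) ∧ xa = (j:Int) then (0:Int) else pvCnt G[k] xa) xa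
        = (fun xa => if xa = (j:Int) then (0:Int) else pvCnt G[k] xa) xa := by
      intro xa; by_cases h : xa = (j:Int) <;> simp [h]
    rw [List.map_congr_left (fun xa _ => hcong xa),
        pv_skip_center G[k] (j:Int) _ _ (by omega) (by omega),
        hrowE k hk (by omega) (by omega)]
    have : pvCnt G[k] (j:Int) = 1 := by
      unfold pvCnt
      rw [pv_getD_row G[k] j hj false, hcell]
      rfl
    rw [this]
  -- a non-centre row's sum
  have hother : ∀ (m : Nat) (hm : m < G.length), m ≠ k → k ≤ m + 1 → m ≤ k + 1 →
      ((PySem.List.pyRange (max 0 ((j:Int) - 1)) (min ((j:Int) + 2) ((G[k].length:Nat):Int))).map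
        (fun xa => if (m:Int) = (k:Int) ∧ xa = (j:Int) then 0 else pvCnt (PySem.List.pyGetD G (m:Int) []) xa)).sum
      = pvEF G[m] (j:Int) := by
    intro m hm hne h1 h2
    rw [pv_getD_row G m hm []]
    have hcong : ∀ xa, (if (m:Int) = (k:Int) ∧ xa = (j:Int) then (0:Int) else pvCnt G[m] xa)
        = pvCnt G[m] xa := by
      intro xa
      rw [if_neg]
      rintro ⟨h3, -⟩
      exact hne (by exact_mod_cast h3)
    rw [List.map_congr_left (fun xa _ => hcong xa), hrowE m hm h1 h2]
  -- B's three vertical terms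
  have hcB : PySem.List.pyGetD (PySem.List.pyGetD (G.map pvRowF) (k:Int) []) (j:Int) 0
      = pvEF G[k] (j:Int) := pv_h_get G k j hk hj
  rw [hcB]
  have hjm : ∀ (m : Nat) (hm : m < G.length), k ≤ m + 1 → m ≤ k + 1 → j < G[m].length := by
    intro m hm h1 h2
    have := hmin m hm h1 h2
    omega
  -- case analysis on the shape of the vertical window
  by_cases hk0 : k = 0
  · subst hk0
    rw [pv_hat_lo _ _ _ (by omega)]
    rw [show max 0 (((0:Nat):Int) - 1) = ((0:Nat):Int) by omega]
    by_cases hH : 2 ≤ G.length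
    · rw [show min (((0:Nat):Int) + 2) ((G.length:Nat):Int) = ((0:Nat):Int) + 2 by omega,
          pv_pyRange_two]
      simp only [List.map_cons, List.map_nil, List.sum_cons, List.sum_nil]
      have hc' := hcenter
      simp only [true_and] at hc' ⊢
      rw [hc']
      rw [show ((0:Nat):Int) + 1 = ((1:Nat):Int) by omega]
      rw [hother 1 (by omega) (by omega) (by omega) (by omega)]
      rw [pv_hat_eq G 1 j (by omega) (hjm 1 (by omega) (by omega) (by omega))]
      ring
    · rw [show min (((0:Nat):Int) + 2) ((G.length:Nat):Int) = ((0:Nat):Int) + 1 by omega,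
          PySem.List.pyRange_one_singleton]
      simp only [List.map_cons, List.map_nil, List.sum_cons, List.sum_nil]
      have hc' := hcenter
      simp only [true_and] at hc' ⊢
      rw [hc']
      rw [pv_hat_hi _ _ _ (by rw [PySem.List.len_eq]; simp; omega)]
      ring
  · have hk1 : 1 ≤ k := by omega
    rw [show max 0 ((k:Int) - 1) = ((k-1:Nat):Int) by omega]
    rw [show (k:Int) - 1 = ((k-1:Nat):Int) by omega,
        pv_hat_eq G (k-1) j (by omega) (hjm (k-1) (by omega) (by omega) (by omega))]
    by_cases hH : k + 2 ≤ G.length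
    · rw [show min ((k:Int) + 2) ((G.length:Nat):Int) = ((k-1:Nat):Int) + 3 by omega,
          pv_pyRange_three]
      simp only [List.map_cons, List.map_nil, List.sum_cons, List.sum_nil]
      rw [hother (k-1) (by omega) (by omega) (by omega) (by omega)]
      rw [show ((k-1:Nat):Int) + 1 = ((k:Nat):Int) by omega]
      have hc' := hcenter
      simp only [true_and] at hc' ⊢
      rw [hc']
      rw [show ((k:Nat):Int) + 1 = ((k+1:Nat):Int) by omega]
      rw [hother (k+1) (by omega) (by omega) (by omega) (by omega)]
      rw [pv_hat_eq G (k+1) j (by omega) (hjm (k+1) (by omega) (by omega) (by omega))]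
      ring
    · rw [show min ((k:Int) + 2) ((G.length:Nat):Int) = ((k-1:Nat):Int) + 2 by omega,
          pv_pyRange_two]
      simp only [List.map_cons, List.map_nil, List.sum_cons, List.sum_nil]
      rw [hother (k-1) (by omega) (by omega) (by omega) (by omega)]
      rw [show ((k-1:Nat):Int) + 1 = ((k:Nat):Int) by omega]
      have hc' := hcenter
      simp only [true_and] at hc' ⊢
      rw [hc']
      rw [pv_hat_hi _ _ _ (by rw [PySem.List.len_eq]; simp; omega)]
      ring

-- the two main loops agree on any grid satisfying the precondition
lemma pv_main (G : List (List Bool)) (hG : PreG G) :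
    (PySem.List.enumerate G).foldl
      (fun (sum : Int) yrow =>
        (PySem.List.enumerate yrow.2).foldl
          (fun sum xcell =>
            if !xcell.2 then sum
            else
              let adjacent_rolls : Int :=
                (PySem.List.pyRange (max 0 (yrow.1 - 1)) (min (yrow.1 + 2) (PySem.List.len G))).foldl
                  (fun a ya =>
                    (PySem.List.pyRange (max 0 (xcell.1 - 1)) (min (xcell.1 + 2) (PySem.List.len yrow.2))).foldl
                      (fun a xa =>
                        if ya == yrow.1 && xa == xcell.1 then a
                        else if PySem.List.pyGetD (PySem.List.pyGetD G ya []) xa false then a + 1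
                        else a)
                      a)
                  0
              if adjacent_rolls < 4 then sum + 1 else sum)
          sum)
      0
    = (PySem.List.enumerate G).foldl
      (fun (total : Int) yrow =>
        (PySem.List.enumerate yrow.2).foldl
          (fun total xcell =>
            if xcell.2 = true ∧
                pvHat (G.map pvRowF) (yrow.1 - 1) xcell.1
                  + PySem.List.pyGetD (PySem.List.pyGetD (G.map pvRowF) yrow.1 []) xcell.1 0
                  + pvHat (G.map pvRowF) (yrow.1 + 1) xcell.1 < 5 then
              total + 1
            else total)
          total)
      0 := by
  apply PySem.List.foldl_congr_mem
  intro acc p hp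
  obtain ⟨k, hk, rfl⟩ := (PySem.List.mem_enumerate_iff G 0 p).mp hp
  apply PySem.List.foldl_congr_mem
  intro acc2 q hq
  simp only [zero_add] at hq ⊢
  obtain ⟨j, hj, rfl⟩ := (PySem.List.mem_enumerate_iff _ 0 q).mp hq
  simp only [zero_add]
  by_cases hc : G[k][j] = true
  · have hcell := pv_cell G hG k j hk hj hc
    simp only [hc, Bool.not_true, Bool.false_eq_true, if_false]
    refine if_congr ⟨fun h => ⟨by simp, by omega⟩, fun h2 => ?_⟩ rfl rfl
    obtain ⟨-, h3⟩ := h2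
    omega
  · have hcf : G[k][j] = false := by
      cases h : G[k][j] with
      | false => rfl
      | true => exact absurd h hc
    simp [hcf]

lemma pv_part1_unfold (pinput : String) :
    part_1 pinput
    = (PySem.List.enumerate ((PySem.Str.splitlines pinput).foldl (fun g in_row => g ++ [in_row.toList.foldl (fun row cell => row ++ [cell == '@']) []]) [])).foldl
      (fun sum yrow =>
        (PySem.List.enumerate yrow.2).foldl
          (fun sum xcell =>
            if !xcell.2 then sum
            else
              let adjacent_rolls : Int :=
                (PySem.List.pyRange (max 0 (yrow.1 - 1)) (min (yrow.1 + 2) (PySem.List.len ((PySem.Str.splitlines pinput).foldl (fun g in_row => g ++ [in_row.toList.foldl (fun row cell => row ++ [cell == '@']) []]) [])))).foldl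
                  (fun a ya =>
                    (PySem.List.pyRange (max 0 (xcell.1 - 1)) (min (xcell.1 + 2) (PySem.List.len yrow.2))).foldl
                      (fun a xa =>
                        if ya == yrow.1 && xa == xcell.1 then a
                        else if PySem.List.pyGetD (PySem.List.pyGetD ((PySem.Str.splitlines pinput).foldl (fun g in_row => g ++ [in_row.toList.foldl (fun row cell => row ++ [cell == '@']) []]) []) ya []) xa false then a + 1
                        else a)
                      a)
                  0
              if adjacent_rolls < 4 then sum + 1 else sum)
          sum)
      0 := rfl

lemma pv_alt_unfold (pinput : String) :
    part_1_alt pinput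
    = (PySem.List.enumerate ((PySem.Str.splitlines pinput).map (fun line => line.toList.map (fun c => c == '@')))).foldl
      (fun total yrow =>
        (PySem.List.enumerate yrow.2).foldl
          (fun total xcell =>
            if xcell.2 = true ∧
                pvHat (((PySem.Str.splitlines pinput).map (fun line => line.toList.map (fun c => c == '@'))).map pvRowF) (yrow.1 - 1) xcell.1
                  + PySem.List.pyGetD (PySem.List.pyGetD (((PySem.Str.splitlines pinput).map (fun line => line.toList.map (fun c => c == '@'))).map pvRowF) yrow.1 []) xcell.1 0
                  + pvHat (((PySem.Str.splitlines pinput).map (fun line => line.toList.map (fun c => c == '@'))).map pvRowF) (yrow.1 + 1) xcell.1 < 5 then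
              total + 1
            else total)
          total)
      0 := rfl

-- ===== VERDICT (by name: the statement is the Claim_ definition above) =====
theorem part_1_spec : Claim_equal_part_1 := by
  intro pinput hdom hpre
  unfold Spec_part_1
  rw [pv_part1_unfold, pv_alt_unfold, pv_grid_eq]
  exact pv_main _ (pv_pre_to_preG pinput hpre)
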